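-- pv_equiv track=rewrite | github.com/twhoekstra/jupyter_micropython_kernel | alpaca_kernel/kernel.py | string_is_array
-- ===== SOURCE A (Python) =====
-- def string_is_array(string):
--     if string.count('[') != string.count(']'):
--         return False
--     if sum(cc.isalpha() for cc in string) > 0:  # cant contain alphanumerics
--         return False
--
--     number_of_numbers = 0
--     number_flag = False
--     for cc in string:
--         if cc.isnumeric() and not number_flag:  # recognize start of number
--             number_flag = True
--         if number_flag and cc in [']', ',']:  # recognize end of number
--             number_flag = False
--             number_of_numbers += 1
--
--     if number_of_numbers != string.count(',') + 1:
--         return False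
--
--     return True
-- ===== SOURCE B (Python) =====
-- def string_is_array(string):
--     if string.count('[') != string.count(']'):
--         return False
--     if any(cc.isalpha() for cc in string):
--         return False
--     parts = string.replace(']', ',').split(',')
--     numbered = sum(1 for p in parts[:-1] if any(cc.isnumeric() for cc in p))
--     return numbered == string.count(',') + 1
-- ===== Notes on version B (the rewrite author's own statement) =====
-- stated objective: simpler
-- what changed: Replaces A's per-character number_flag state machine by a split pass: map the closing bracket to the comma delimiter, split on it, and count the segments before a delimiter that contain a digit.
import Mathlib
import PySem

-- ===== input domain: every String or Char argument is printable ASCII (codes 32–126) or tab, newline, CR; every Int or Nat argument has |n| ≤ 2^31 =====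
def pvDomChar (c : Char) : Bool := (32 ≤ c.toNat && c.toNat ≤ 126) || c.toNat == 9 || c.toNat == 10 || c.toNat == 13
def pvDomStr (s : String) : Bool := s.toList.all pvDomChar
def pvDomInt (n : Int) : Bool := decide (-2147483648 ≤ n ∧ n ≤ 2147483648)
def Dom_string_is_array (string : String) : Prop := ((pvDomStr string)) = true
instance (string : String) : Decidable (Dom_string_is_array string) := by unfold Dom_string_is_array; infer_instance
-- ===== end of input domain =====

-- B replaces A's per-character flag machine by a split-on-delimiters pass: count the
-- segments preceding a ']' or ',' that contain a digit (simpler decomposition, same cost).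

-- ===== PORT A =====
-- cc.isnumeric() / cc.isalpha() are ported as PySem.Chars.isdigit / isalpha: exact on the
-- printable-ASCII domain, where the numeric characters are exactly '0'..'9'.
def string_is_array (string : String) : Bool :=
  if PySem.Str.count string "[" ≠ PySem.Str.count string "]" then false
  else if ((string.toList.map (fun cc => if PySem.Chars.isalpha cc then (1 : Int) else 0)).sum > 0) then false
  else
    let st := string.toList.foldl (fun (s : Int × Bool) cc =>
      let flag := if PySem.Chars.isdigit cc && !s.2 then true else s.2
      if flag && [']', ','].contains cc then (s.1 + 1, false) else (s.1, flag))
      ((0 : Int), false)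
    if st.1 ≠ (PySem.Str.count string "," : Int) + 1 then false
    else true

-- ===== PORT B =====
-- cc.isnumeric() ported as PySem.Chars.isdigit (exact on the printable-ASCII domain)
def string_is_array_alt (string : String) : Bool :=
  if PySem.Str.count string "[" ≠ PySem.Str.count string "]" then false
  else if string.toList.any (fun cc => PySem.Chars.isalpha cc) then false
  else
    let parts := PySem.Chars.splitOn (PySem.Str.replace string "]" ",").toList [',']
    let numbered := ((PySem.List.slice parts none (some (-1))).filter
        (fun p => p.any (fun cc => PySem.Chars.isdigit cc))).length
    numbered == PySem.Str.count string "," + 1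

-- ===== PRECONDITION & SPEC =====
def Spec_string_is_array (string : String) (out : Bool) : Prop := out = string_is_array_alt string
instance (string : String) (out : Bool) : Decidable (Spec_string_is_array string out) := by unfold Spec_string_is_array; infer_instance

-- ===== CLAIM (what is proved, stated in full; the proofs are below) =====
def Claim_equal_string_is_array : Prop := ∀ (string : String), Dom_string_is_array string → Spec_string_is_array string (string_is_array string)

-- ===== LEMMAS AND PROOFS =====

-- map ']' to ',' (what string.replace(']', ',') does per character)
def pvF (c : Char) : Char := if c = ']' then ',' else c

-- split on the delimiter set {']', ','}
def pvSplit : List Char → List (List Char)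
  | [] => [[]]
  | c :: t => if c = ']' ∨ c = ',' then [] :: pvSplit t else (pvSplit t).modifyHead (c :: ·)

-- split on ','
def pvSplitC : List Char → List (List Char)
  | [] => [[]]
  | c :: t => if c = ',' then [] :: pvSplitC t else (pvSplitC t).modifyHead (c :: ·)

-- A's flag-machine count, as a structural recursion
def pvCnt : List Char → Bool → Nat
  | [], _ => 0
  | c :: t, b =>
    let fl := b || PySem.Chars.isdigit c
    if fl && (decide (c = ']') || decide (c = ',')) then pvCnt t false + 1 else pvCnt t fl

-- the same count over segments: all but the last segment, digit-containing, first or-ed with b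
def pvG : List (List Char) → Bool → Nat
  | [], _ => 0
  | [_], _ => 0
  | p :: q :: ps, b =>
    (if b || p.any PySem.Chars.isdigit then 1 else 0) + pvG (q :: ps) false

lemma pvSplit_ne_nil (l : List Char) : pvSplit l ≠ [] := by
  cases l with
  | nil => simp [pvSplit]
  | cons c t =>
    simp only [pvSplit]
    split
    · simp
    · cases h : pvSplit t with
      | nil => exact absurd h (pvSplit_ne_nil t)
      | cons p ps => simp

lemma pvSplitC_ne_nil (l : List Char) : pvSplitC l ≠ [] := by
  cases l with
  | nil => simp [pvSplitC]
  | cons c t =>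
    simp only [pvSplitC]
    split
    · simp
    · cases h : pvSplitC t with
      | nil => exact absurd h (pvSplitC_ne_nil t)
      | cons p ps => simp

lemma pvFoldA (l : List Char) (n : Int) (b : Bool) :
    (l.foldl (fun (s : Int × Bool) cc =>
      let flag := if PySem.Chars.isdigit cc && !s.2 then true else s.2
      if flag && [']', ','].contains cc then (s.1 + 1, false) else (s.1, flag)) (n, b)).1
    = n + pvCnt l b := by
  induction l generalizing n b with
  | nil => simp [pvCnt]
  | cons c t ih =>
    simp only [List.foldl_cons, pvCnt]
    have hflag : (if PySem.Chars.isdigit c && !b then true else b) = (b || PySem.Chars.isdigit c) := by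
      cases b <;> cases PySem.Chars.isdigit c <;> rfl
    have hmem : ([']', ','].contains c) = (decide (c = ']') || decide (c = ',')) := by
      simp
    rw [hflag, hmem]
    split
    · rw [ih]; push_cast; ring
    · rw [ih]

lemma pvDelim_not_digit (c : Char) (h : c = ']' ∨ c = ',') : PySem.Chars.isdigit c = false := by
  rcases h with h | h <;> subst h <;> decide

lemma pvCnt_eq_pvG (l : List Char) (b : Bool) : pvCnt l b = pvG (pvSplit l) b := by
  induction l generalizing b with
  | nil => simp [pvCnt, pvSplit, pvG]
  | cons c t ih =>
    by_cases hd : c = ']' ∨ c = ','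
    · have hdig := pvDelim_not_digit c hd
      have hbe : (decide (c = ']') || decide (c = ',')) = true := by
        rcases hd with h | h <;> subst h <;> decide
      have hstep : pvCnt (c :: t) b = (if b then 1 else 0) + pvCnt t false := by
        simp only [pvCnt, hdig, Bool.or_false, hbe, Bool.and_true]
        cases b <;> simp [Nat.add_comm]
      rw [hstep, show pvSplit (c :: t) = [] :: pvSplit t from by simp [pvSplit, hd]]
      cases hs : pvSplit t with
      | nil => exact absurd hs (pvSplit_ne_nil t)
      | cons p ps =>
        have h2 := ih false
        rw [hs] at h2
        have hg : pvG ([] :: p :: ps) b = (if b then 1 else 0) + pvG (p :: ps) false := by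
          simp [pvG]
        rw [hg, h2]
    · rcases not_or.mp hd with ⟨h1, h2⟩
      have hbe : (decide (c = ']') || decide (c = ',')) = false := by simp [h1, h2]
      have hstep : pvCnt (c :: t) b = pvCnt t (b || PySem.Chars.isdigit c) := by
        simp [pvCnt, hbe]
      rw [hstep, show pvSplit (c :: t) = (pvSplit t).modifyHead (c :: ·) from by
        simp [pvSplit, hd]]
      cases hs : pvSplit t with
      | nil => exact absurd hs (pvSplit_ne_nil t)
      | cons p ps =>
        have h2 := ih (b || PySem.Chars.isdigit c)
        rw [hs] at h2
        rw [h2]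
        simp only [List.modifyHead_cons]
        cases ps with
        | nil => simp [pvG]
        | cons q ps' => simp [pvG, Bool.or_assoc]

lemma pvG_false (ps : List (List Char)) :
    pvG ps false = ((ps.dropLast).filter (fun p => p.any PySem.Chars.isdigit)).length := by
  match ps with
  | [] => simp [pvG]
  | [p] => simp [pvG]
  | p :: q :: ps' =>
    have := pvG_false (q :: ps')
    simp only [pvG, Bool.false_or, this, List.dropLast_cons₂, List.filter_cons]
    split <;> simp [Nat.add_comm]

lemma pvReplaceGo (fuel : Nat) (l acc : List Char) (h : l.length ≤ fuel) :
    PySem.Chars.replace.go [']'] [','] fuel l acc = acc.reverse ++ l.map pvF := by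
  induction fuel generalizing l acc with
  | zero =>
    have : l = [] := by cases l <;> simp_all
    subst this
    simp [PySem.Chars.replace.go]
  | succ fuel ih =>
    cases l with
    | nil => simp [PySem.Chars.replace.go]
    | cons c t =>
      simp only [PySem.Chars.replace.go]
      by_cases hc : c = ']'
      · subst hc
        rw [if_pos (by simp [List.isPrefixOf])]
        simp only [List.length_cons] at h
        have hdrop : List.drop ([']'] : List Char).length (']' :: t) = t := rfl
        rw [hdrop, ih _ _ (by omega)]
        simp [pvF]
      · rw [if_neg (by simp [List.isPrefixOf, hc]; intro he; exact hc he.symm)]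
        simp only [List.length_cons] at h
        rw [ih _ _ (by omega)]
        simp [pvF, hc]

lemma pvReplace (l : List Char) : PySem.Chars.replace l [']'] [','] = l.map pvF := by
  have := pvReplaceGo l.length l [] (le_refl _)
  simpa [PySem.Chars.replace]

lemma pvSplitGo (fuel : Nat) (l cur : List Char) (acc : List (List Char)) (h : l.length < fuel) :
    PySem.Chars.splitOn.go [','] fuel l cur acc
      = acc.reverse ++ (pvSplitC l).modifyHead (cur.reverse ++ ·) := by
  induction fuel generalizing l cur acc with
  | zero => omega
  | succ fuel ih =>
    cases l with
    | nil => simp [PySem.Chars.splitOn.go, pvSplitC]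
    | cons c t =>
      simp only [PySem.Chars.splitOn.go]
      by_cases hc : c = ','
      · subst hc
        rw [if_pos (by simp [List.isPrefixOf])]
        simp only [List.length_cons] at h
        have hdrop : List.drop ([','] : List Char).length (',' :: t) = t := rfl
        rw [hdrop, ih _ _ _ (by omega)]
        cases hs : pvSplitC t with
        | nil => exact absurd hs (pvSplitC_ne_nil t)
        | cons p ps => simp [pvSplitC, hs]
      · rw [if_neg (by simp [List.isPrefixOf, hc]; intro he; exact hc he.symm)]
        simp only [List.length_cons] at h
        rw [ih _ _ _ (by omega)]
        cases hs : pvSplitC t with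
        | nil => exact absurd hs (pvSplitC_ne_nil t)
        | cons p ps => simp [pvSplitC, hc, hs]

lemma pvSplitOn (l : List Char) : PySem.Chars.splitOn l [','] = pvSplitC l := by
  have := pvSplitGo (l.length + 1) l [] [] (by omega)
  rw [PySem.Chars.splitOn] at *
  rw [this]
  cases hs : pvSplitC l with
  | nil => exact absurd hs (pvSplitC_ne_nil l)
  | cons p ps => simp

lemma pvSplitC_map (l : List Char) : pvSplitC (l.map pvF) = pvSplit l := by
  induction l with
  | nil => simp [pvSplitC, pvSplit]
  | cons c t ih =>
    simp only [List.map_cons, pvSplitC, pvSplit]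
    by_cases hd : c = ']' ∨ c = ','
    · have : pvF c = ',' := by rcases hd with h | h <;> simp [pvF, h]
      simp [this, hd, ih]
    · rcases (not_or.mp hd) with ⟨h1, h2⟩
      have hfc : pvF c = c := by simp [pvF, h1]
      simp only [hfc, if_neg h2, if_neg hd, ih]

lemma pvSlice_dropLast (ps : List (List Char)) :
    PySem.List.slice ps none (some (-1)) = ps.dropLast := by
  rcases eq_or_ne ps [] with h | h
  · subst h; rfl
  · simp only [PySem.List.slice, PySem.List.clampIdx, List.dropLast_eq_take]
    simp [h]
    omega

lemma pvAlpha (l : List Char) :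
    ((l.map (fun cc => if PySem.Chars.isalpha cc then (1 : Int) else 0)).sum > 0)
      ↔ (l.any (fun cc => PySem.Chars.isalpha cc) = true) := by
  rw [PySem.List.sum_map_ite_one_zero]
  rw [List.any_eq_true]
  constructor
  · intro h
    have : 0 < List.countP (fun cc => PySem.Chars.isalpha cc) l := by exact_mod_cast h
    obtain ⟨x, hx, hp⟩ := List.countP_pos_iff.mp this
    exact ⟨x, hx, hp⟩
  · rintro ⟨x, hx, hp⟩
    have : 0 < List.countP (fun cc => PySem.Chars.isalpha cc) l :=
      List.countP_pos_iff.mpr ⟨x, hx, hp⟩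
    exact_mod_cast this

lemma pvCounts (s : String) :
    (s.toList.foldl (fun (st : Int × Bool) cc =>
      let flag := if PySem.Chars.isdigit cc && !st.2 then true else st.2
      if flag && [']', ','].contains cc then (st.1 + 1, false) else (st.1, flag))
      ((0 : Int), false)).1
    = (((PySem.List.slice (PySem.Chars.splitOn (PySem.Str.replace s "]" ",").toList [','])
          none (some (-1))).filter (fun p => p.any (fun cc => PySem.Chars.isdigit cc))).length : Int) := by
  rw [pvFoldA, pvCnt_eq_pvG, pvG_false]
  have hrep : (PySem.Str.replace s "]" ",").toList = (s.toList).map pvF := by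
    simp only [PySem.Str.replace, String.toList_ofList]
    have : ("]" : String).toList = [']'] := by decide
    have h2 : ("," : String).toList = [','] := by decide
    rw [this, h2, pvReplace]
  rw [hrep, pvSplitOn, pvSplitC_map, pvSlice_dropLast]
  push_cast
  ring

-- ===== VERDICT (by name: the statement is the Claim_ definition above) =====
theorem string_is_array_spec : Claim_equal_string_is_array := by
  intro s _
  unfold Spec_string_is_array string_is_array string_is_array_alt
  by_cases h1 : PySem.Str.count s "[" ≠ PySem.Str.count s "]"
  · rw [if_pos h1, if_pos h1]
  · rw [if_neg h1, if_neg h1]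
    by_cases h2 : s.toList.any (fun cc => PySem.Chars.isalpha cc) = true
    · rw [if_pos ((pvAlpha s.toList).mpr h2), if_pos h2]
    · rw [if_neg (fun hc => h2 ((pvAlpha s.toList).mp hc)), if_neg h2]
      simp only [pvCounts]
      by_cases h3 : ((PySem.List.slice (PySem.Chars.splitOn (PySem.Str.replace s "]" ",").toList [','])
            none (some (-1))).filter (fun p => p.any (fun cc => PySem.Chars.isdigit cc))).length
          = PySem.Str.count s "," + 1
      · rw [if_neg (not_not.mpr (by exact_mod_cast h3))]
        exact (beq_iff_eq.mpr h3).symm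
      · rw [if_pos (by intro hc; exact h3 (by exact_mod_cast hc))]
        symm
        rw [beq_eq_false_iff_ne]
        exact h3
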